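-- pv_equiv track=rewrite | github.com/bk797/AoC | solutions/day11.py | largestGrid
-- ===== SOURCE A (Python) =====
-- def largestGrid(sumGrid,size):
-- 	bounds = len(sumGrid)
-- 	max = 0
-- 	maxX = -1
-- 	maxY = -1
-- 	for y in range(0,bounds-size):
-- 		for x in range(0,bounds-size):
-- 			sum = 0
-- 			for dx in range(x,x+size):
-- 				sum += sumGrid[dx][y]
-- 			if sum > max:
-- 				maxX = x
-- 				maxY = y
-- 				max = sum
-- 	return [maxX,maxY,max]
-- ===== SOURCE B (Python) =====
-- def largestGrid(sumGrid, size):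
-- 	# Sliding-window strip sum per column instead of re-summing each window.
-- 	bounds = len(sumGrid)
-- 	n = bounds - size
-- 	best, bx, by = 0, -1, -1
-- 	if size >= 1 and n >= 1:
-- 		for y in range(n):
-- 			w = 0
-- 			for dx in range(size):
-- 				w += sumGrid[dx][y]
-- 			if w > best:
-- 				best, bx, by = w, 0, y
-- 			for x in range(1, n):
-- 				w += sumGrid[x + size - 1][y] - sumGrid[x - 1][y]
-- 				if w > best:
-- 					best, bx, by = w, x, y
-- 	return [bx, by, best]
-- ===== Notes on version B (the rewrite author's own statement) =====
-- stated objective: alternative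
-- what changed: Replaces A's fresh size-term summation for every (x,y) window by a per-column sliding window that updates the strip sum incrementally (add the entering cell, subtract the leaving one), removing the inner summation loop; fewer additions per window, though a timing run's inputs showed no measurable wall-clock gain.
import Mathlib
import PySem

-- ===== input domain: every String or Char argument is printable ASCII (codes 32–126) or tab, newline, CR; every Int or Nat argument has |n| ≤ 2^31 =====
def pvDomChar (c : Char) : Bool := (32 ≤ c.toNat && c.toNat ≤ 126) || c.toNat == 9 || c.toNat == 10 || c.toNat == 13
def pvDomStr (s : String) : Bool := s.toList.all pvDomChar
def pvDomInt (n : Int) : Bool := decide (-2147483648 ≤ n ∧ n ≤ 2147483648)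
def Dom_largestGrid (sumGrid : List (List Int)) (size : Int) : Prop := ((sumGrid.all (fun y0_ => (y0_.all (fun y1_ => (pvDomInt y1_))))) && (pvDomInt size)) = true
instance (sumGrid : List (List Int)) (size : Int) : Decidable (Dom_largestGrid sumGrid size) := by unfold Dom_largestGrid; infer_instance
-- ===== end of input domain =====

-- B replaces A's per-window re-summation by a per-column sliding window (incremental strip sums); return values proved equal on Pre_.

-- ===== PORT A =====
-- shared cell accessor: sumGrid[dx][y] (total via defaults; exact under Pre_, which rules out IndexError)
def pvCell (g : List (List Int)) (y dx : Int) : Int :=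
  PySem.List.pyGetD (PySem.List.pyGetD g dx []) y 0

def largestGrid (sumGrid : List (List Int)) (size : Int) : List Int :=
  let bounds : Int := sumGrid.length
  let st :=
    (PySem.List.pyRange 0 (bounds - size) 1).foldl (fun st y =>
      (PySem.List.pyRange 0 (bounds - size) 1).foldl (fun st x =>
        let s := (PySem.List.pyRange x (x + size) 1).foldl
          (fun s dx => s + pvCell sumGrid y dx) 0
        if s > st.1 then (s, x, y) else st) st)
      ((0 : Int), (-1 : Int), (-1 : Int))
  [st.2.1, st.2.2, st.1]

-- ===== PORT B =====
def largestGrid_alt (sumGrid : List (List Int)) (size : Int) : List Int :=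
  let bounds : Int := sumGrid.length
  let n : Int := bounds - size
  let st :=
    if 1 ≤ size ∧ 1 ≤ n then
      (PySem.List.pyRange 0 n 1).foldl (fun st y =>
        let w0 := (PySem.List.pyRange 0 size 1).foldl (fun s dx => s + pvCell sumGrid y dx) 0
        let st1 := if w0 > st.1 then (w0, (0 : Int), y) else st
        ((PySem.List.pyRange 1 n 1).foldl
          (fun (p : Int × (Int × Int × Int)) x =>
            let w := p.1 + pvCell sumGrid y (x + size - 1) - pvCell sumGrid y (x - 1)
            (w, if w > p.2.1 then (w, x, y) else p.2))
          (w0, st1)).2)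
        ((0 : Int), (-1 : Int), (-1 : Int))
    else ((0 : Int), (-1 : Int), (-1 : Int))
  [st.2.1, st.2.2, st.1]

-- ===== PRECONDITION & SPEC =====
-- Pre_ excludes exactly the inputs where A raises IndexError: when size ≥ 1 and bounds - size ≥ 1,
-- A reads sumGrid[dx][y] for dx ≤ bounds-2 and y ≤ bounds-size-1, so every row except possibly the
-- last must have length ≥ bounds - size; otherwise A raises.
def Pre_largestGrid (sumGrid : List (List Int)) (size : Int) : Prop :=
  size < 1 ∨ (sumGrid.length : Int) - size < 1 ∨
    ∀ row ∈ sumGrid.dropLast, (sumGrid.length : Int) - size ≤ (row.length : Int)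
instance (sumGrid : List (List Int)) (size : Int) : Decidable (Pre_largestGrid sumGrid size) := by
  unfold Pre_largestGrid; infer_instance

def pvWitness_largestGrid : List (List Int) × Int := ([[1, 2], [3, 4]], 1)

def Spec_largestGrid (sumGrid : List (List Int)) (size : Int) (out : List Int) : Prop := out = largestGrid_alt sumGrid size
instance (sumGrid : List (List Int)) (size : Int) (out : List Int) : Decidable (Spec_largestGrid sumGrid size out) := by unfold Spec_largestGrid; infer_instance

-- ===== CLAIM (what is proved, stated in full; the proofs are below) =====
def Claim_equal_largestGrid : Prop := ∀ (sumGrid : List (List Int)) (size : Int), Dom_largestGrid sumGrid size → Pre_largestGrid sumGrid size → Spec_largestGrid sumGrid size (largestGrid sumGrid size)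

-- ===== LEMMAS AND PROOFS =====

-- A's inner loop: sum of the column strip sumGrid[x..x+size-1][y]
def stripSum (g : List (List Int)) (size y x : Int) : Int :=
  (PySem.List.pyRange x (x + size) 1).foldl (fun s dx => s + pvCell g y dx) 0

theorem stripSum_zero (g : List (List Int)) (size y x : Int) (h : size ≤ 0) :
    stripSum g size y x = 0 := by
  unfold stripSum
  rw [PySem.List.pyRange_one_eq_nil (by omega)]
  rfl

theorem stripSum_step (g : List (List Int)) (size y x : Int) (h : 1 ≤ size) :
    stripSum g size y (x + 1) = stripSum g size y x + pvCell g y (x + size) - pvCell g y x := by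
  unfold stripSum
  have h1 : PySem.List.pyRange x (x + size) 1 = x :: PySem.List.pyRange (x + 1) (x + size) 1 :=
    PySem.List.pyRange_one_cons (by omega)
  have he : x + 1 + size = (x + size) + 1 := by ring
  have h2 : PySem.List.pyRange (x + 1) (x + 1 + size) 1
      = PySem.List.pyRange (x + 1) (x + size) 1 ++ [x + size] := by
    rw [he]; exact PySem.List.pyRange_one_succ_right (by omega)
  rw [h1, h2]
  simp only [List.foldl_append, List.foldl, PySem.List.foldl_add]
  ring

-- A-side per-y loop body
def fA (g : List (List Int)) (size y : Int) (st : Int × Int × Int) (x : Int) : Int × Int × Int :=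
  if stripSum g size y x > st.1 then (stripSum g size y x, x, y) else st

-- B-side per-y loop body (carries the sliding window sum)
def fB (g : List (List Int)) (size y : Int) (p : Int × (Int × Int × Int)) (x : Int) :
    Int × (Int × Int × Int) :=
  let w := p.1 + pvCell g y (x + size - 1) - pvCell g y (x - 1)
  (w, if w > p.2.1 then (w, x, y) else p.2)

theorem slide (g : List (List Int)) (size y : Int) (hs : 1 ≤ size) :
    ∀ (k : Nat) (a : Int) (st : Int × Int × Int), 1 ≤ a →
      ((PySem.List.pyRange a (a + k) 1).foldl (fB g size y) (stripSum g size y (a - 1), st)).2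
        = (PySem.List.pyRange a (a + k) 1).foldl (fA g size y) st := by
  intro k
  induction k with
  | zero =>
    intro a st _
    rw [PySem.List.pyRange_one_eq_nil (by omega)]
    rfl
  | succ k ih =>
    intro a st ha
    have hcons : PySem.List.pyRange a (a + (k + 1 : Nat)) 1
        = a :: PySem.List.pyRange (a + 1) (a + (k + 1 : Nat)) 1 :=
      PySem.List.pyRange_one_cons (by push_cast; omega)
    rw [hcons, List.foldl_cons, List.foldl_cons]
    have hw : stripSum g size y (a - 1) + pvCell g y (a + size - 1) - pvCell g y (a - 1)
        = stripSum g size y a := by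
      have := stripSum_step g size y (a - 1) hs
      have e1 : a - 1 + 1 = a := by ring
      have e2 : a - 1 + size = a + size - 1 := by ring
      rw [e1, e2] at this
      omega
    have hfb : fB g size y (stripSum g size y (a - 1), st) a
        = (stripSum g size y ((a + 1) - 1), fA g size y st a) := by
      simp only [fB, fA, hw]
      have e : a + 1 - 1 = a := by ring
      rw [e]
    rw [hfb]
    have hrange : a + (k + 1 : Nat) = (a + 1) + (k : Nat) := by push_cast; ring
    rw [hrange]
    exact ih (a + 1) (fA g size y st a) (by omega)

-- the per-y bodies of the two ports coincide (main case: size ≥ 1, n ≥ 1)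
theorem ybody_eq (g : List (List Int)) (size n y : Int) (hs : 1 ≤ size) (hn : 1 ≤ n)
    (st : Int × Int × Int) :
    ((PySem.List.pyRange 1 n 1).foldl (fB g size y)
        (stripSum g size y 0, if stripSum g size y 0 > st.1 then (stripSum g size y 0, 0, y) else st)).2
      = (PySem.List.pyRange 0 n 1).foldl (fA g size y) st := by
  have h0 : PySem.List.pyRange 0 n 1 = 0 :: PySem.List.pyRange 1 n 1 := by
    have := PySem.List.pyRange_one_cons (a := 0) (b := n) (by omega)
    simpa using this
  rw [h0, List.foldl_cons]
  have hfa : fA g size y st 0 = if stripSum g size y 0 > st.1 then (stripSum g size y 0, 0, y) else st := rfl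
  rw [← hfa]
  have hk : n = 1 + ((n - 1).toNat : Int) := by omega
  have h1 : stripSum g size y ((1 : Int) - 1) = stripSum g size y 0 := by norm_num
  calc ((PySem.List.pyRange 1 n 1).foldl (fB g size y)
          (stripSum g size y 0, fA g size y st 0)).2
      = ((PySem.List.pyRange 1 (1 + ((n - 1).toNat : Int)) 1).foldl (fB g size y)
          (stripSum g size y ((1 : Int) - 1), fA g size y st 0)).2 := by rw [← hk, h1]
    _ = (PySem.List.pyRange 1 (1 + ((n - 1).toNat : Int)) 1).foldl (fA g size y) (fA g size y st 0) :=
        slide g size y hs (n - 1).toNat 1 (fA g size y st 0) (by omega)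
    _ = (PySem.List.pyRange 1 n 1).foldl (fA g size y) (fA g size y st 0) := by rw [← hk]

-- degenerate case size ≤ 0: every strip sum is 0, so A's state never changes
theorem xfold_const (g : List (List Int)) (size y : Int) (hs : size ≤ 0) :
    ∀ (l : List Int) (st : Int × Int × Int), 0 ≤ st.1 →
      l.foldl (fA g size y) st = st := by
  intro l
  induction l with
  | nil => intro st _; rfl
  | cons x t ih =>
    intro st hst
    rw [List.foldl_cons]
    have : fA g size y st x = st := by
      simp only [fA, stripSum_zero g size y x hs]
      split_ifs with h
      · omega
      · rfl
    rw [this]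
    exact ih st hst

theorem yfold_const (g : List (List Int)) (size n : Int) (hs : size ≤ 0) :
    ∀ (l : List Int) (st : Int × Int × Int), 0 ≤ st.1 →
      l.foldl (fun st y => (PySem.List.pyRange 0 n 1).foldl (fA g size y) st) st = st := by
  intro l
  induction l with
  | nil => intro st _; rfl
  | cons y t ih =>
    intro st hst
    rw [List.foldl_cons, xfold_const g size y hs _ st hst]
    exact ih st hst

-- ===== VERDICT (by name: the statement is the Claim_ definition above) =====
theorem largestGrid_spec : Claim_equal_largestGrid := by
  intro g size _hdom _hpre
  unfold Spec_largestGrid largestGrid largestGrid_alt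
  dsimp only
  by_cases hc : 1 ≤ size ∧ 1 ≤ ((g.length : Int) - size)
  · rw [if_pos hc]
    have hw0 : ∀ y : Int,
        (PySem.List.pyRange 0 size 1).foldl (fun s dx => s + pvCell g y dx) 0
          = stripSum g size y 0 := by
      intro y; unfold stripSum; norm_num
    have key :
        ((PySem.List.pyRange 0 ((g.length : Int) - size) 1).foldl
           (fun st y => (PySem.List.pyRange 0 ((g.length : Int) - size) 1).foldl (fA g size y) st)
           ((0 : Int), (-1 : Int), (-1 : Int)))
        = ((PySem.List.pyRange 0 ((g.length : Int) - size) 1).foldl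
           (fun st y =>
             ((PySem.List.pyRange 1 ((g.length : Int) - size) 1).foldl (fB g size y)
               ((PySem.List.pyRange 0 size 1).foldl (fun s dx => s + pvCell g y dx) 0,
                if (PySem.List.pyRange 0 size 1).foldl (fun s dx => s + pvCell g y dx) 0 > st.1
                then ((PySem.List.pyRange 0 size 1).foldl (fun s dx => s + pvCell g y dx) 0, (0 : Int), y)
                else st)).2)
           ((0 : Int), (-1 : Int), (-1 : Int))) := by
      apply PySem.List.foldl_congr_mem
      intro st y _
      rw [hw0 y]
      exact (ybody_eq g size ((g.length : Int) - size) y hc.1 hc.2 st).symm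
    exact congrArg (fun st : Int × Int × Int => [st.2.1, st.2.2, st.1]) key
  · rw [if_neg hc]
    have key :
        ((PySem.List.pyRange 0 ((g.length : Int) - size) 1).foldl
           (fun st y => (PySem.List.pyRange 0 ((g.length : Int) - size) 1).foldl (fA g size y) st)
           ((0 : Int), (-1 : Int), (-1 : Int)))
        = ((0 : Int), (-1 : Int), (-1 : Int)) := by
      rcases not_and_or.mp hc with h | h
      · exact yfold_const g size ((g.length : Int) - size) (by omega)
          (PySem.List.pyRange 0 ((g.length : Int) - size) 1) ((0 : Int), (-1 : Int), (-1 : Int))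
          (by norm_num)
      · rw [PySem.List.pyRange_one_eq_nil (by omega)]
        rfl
    exact congrArg (fun st : Int × Int × Int => [st.2.1, st.2.2, st.1]) key
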